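-- pv_equiv track=rewrite | github.com/Mujtaba7734/Updated-Projects | Tic tac toe/tictactoe_hard.py | completed_algorithm
-- ===== SOURCE A (Python) =====
-- def completed_algorithm(location):
--     check = False
--     diff = []
--     if len(location) >= 3:
--         for x in range(len(location) -1):
--             d = location[x +1] -location[x]
--             diff.append(d)
--         x = 1
--         check = False
--         while x <= len(location) -2 and check == False:
--             if diff[x-1] == 1 and diff[x] == 1 and location[x] %3 ==0:
--                 check = True
--             elif diff[x- 1] == 2 and diff[x] == 2 and location[0] %2 == 0:
--                 check = True
--             elif diff[x-1] ==3 and diff[x] == 3: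
--                 check = True
--             elif diff[x-1] == 4 and diff[x] ==4:
--                 check = True
--             x +=1
--     return check
-- ===== SOURCE B (Python) =====
-- def completed_algorithm(location):
--     # Staged passes: the result is a pure existence check, so test one candidate
--     # step d at a time.  mids(d) collects the middle indices of length-3 windows
--     # that form an arithmetic progression with step d.
--     n = len(location)
--
--     def mids(d):
--         return [i for i in range(1, n - 1)
--                 if location[i] - location[i - 1] == d
--                 and location[i + 1] - location[i] == d]
--
--     if any(location[i] % 3 == 0 for i in mids(1)):
--         return True
--     if mids(2) and location[0] % 2 == 0:
--         return True
--     return bool(mids(3)) or bool(mids(4))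
-- ===== Notes on version B (the rewrite author's own statement) =====
-- stated objective: alternative
-- what changed: Replaces A's build-a-diff-table-then-indexed-while-scan (one fused scan with a 4-way branch and early exit) with staged per-step passes: since the result is a pure existence check, B collects for each candidate step d=1,2,3,4 the middle indices of 3-term arithmetic progressions with that step and tests each side condition on its own pass.
import Mathlib
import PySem

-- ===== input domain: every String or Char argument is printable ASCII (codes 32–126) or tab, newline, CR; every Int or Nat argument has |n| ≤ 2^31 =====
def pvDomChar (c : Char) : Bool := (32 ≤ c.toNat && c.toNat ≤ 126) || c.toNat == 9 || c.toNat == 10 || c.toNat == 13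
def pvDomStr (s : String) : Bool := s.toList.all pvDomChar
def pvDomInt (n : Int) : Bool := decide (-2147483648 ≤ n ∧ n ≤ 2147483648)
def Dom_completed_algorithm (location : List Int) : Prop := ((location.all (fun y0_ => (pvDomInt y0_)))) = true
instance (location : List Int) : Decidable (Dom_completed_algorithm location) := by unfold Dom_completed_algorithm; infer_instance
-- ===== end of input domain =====

-- B replaces A's diff-table-plus-fused-4-way-branch scan with one pass per candidate step
-- (the result is a pure existence check, so the disjunction splits); objective: alternative.

-- ===== PORT A =====
-- diff = [] ; for x in range(len(location)-1): diff.append(location[x+1]-location[x])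
-- (indices produced by range are always in bounds, so pyGetD with default 0 is exact here)
def pvDiffA (location : List Int) : List Int :=
  (PySem.List.pyRange 0 ((location.length : Int) - 1) 1).foldl
    (fun diff x => diff ++ [PySem.List.pyGetD location (x + 1) 0 - PySem.List.pyGetD location x 0]) []

-- the while loop; fuel bounds the iteration count (fuel = len(location) at the call is enough)
def pvWhileA (location diff : List Int) : Nat → Int → Bool
  | 0, _ => false
  | fuel + 1, x =>
    if x ≤ (location.length : Int) - 2 then
      if PySem.List.pyGetD diff (x - 1) 0 == 1 && PySem.List.pyGetD diff x 0 == 1 &&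
          PySem.Int.mod (PySem.List.pyGetD location x 0) 3 == 0 then true
      else if PySem.List.pyGetD diff (x - 1) 0 == 2 && PySem.List.pyGetD diff x 0 == 2 &&
          PySem.Int.mod (PySem.List.pyGetD location 0 0) 2 == 0 then true
      else if PySem.List.pyGetD diff (x - 1) 0 == 3 && PySem.List.pyGetD diff x 0 == 3 then true
      else if PySem.List.pyGetD diff (x - 1) 0 == 4 && PySem.List.pyGetD diff x 0 == 4 then true
      else pvWhileA location diff fuel (x + 1)
    else false

def completed_algorithm (location : List Int) : Bool :=
  if (location.length : Int) ≥ 3 then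
    pvWhileA location (pvDiffA location) location.length 1
  else false

-- ===== PORT B =====
-- mids(d) = [i for i in range(1, n-1) if location[i]-location[i-1]==d and location[i+1]-location[i]==d]
-- (indices i-1, i, i+1 are in bounds for every i the range produces, so pyGetD with default 0 is exact)
def pvMids (location : List Int) (d : Int) : List Int :=
  (PySem.List.pyRange 1 ((location.length : Int) - 1) 1).filter
    (fun i => PySem.List.pyGetD location i 0 - PySem.List.pyGetD location (i - 1) 0 == d &&
              PySem.List.pyGetD location (i + 1) 0 - PySem.List.pyGetD location i 0 == d)

-- location[0] is only evaluated when mids(2) is nonempty, hence location ≠ [], so pyGetD is exact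
def completed_algorithm_alt (location : List Int) : Bool :=
  if (pvMids location 1).any (fun i => PySem.Int.mod (PySem.List.pyGetD location i 0) 3 == 0) then
    true
  else if !(pvMids location 2).isEmpty && PySem.Int.mod (PySem.List.pyGetD location 0 0) 2 == 0 then
    true
  else !(pvMids location 3).isEmpty || !(pvMids location 4).isEmpty

-- ===== PRECONDITION & SPEC =====
def Spec_completed_algorithm (location : List Int) (out : Bool) : Prop := out = completed_algorithm_alt location
instance (location : List Int) (out : Bool) : Decidable (Spec_completed_algorithm location out) := by unfold Spec_completed_algorithm; infer_instance

-- ===== CLAIM (what is proved, stated in full; the proofs are below) =====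
def Claim_equal_completed_algorithm : Prop := ∀ (location : List Int), Dom_completed_algorithm location → Spec_completed_algorithm location (completed_algorithm location)

-- ===== LEMMAS AND PROOFS =====

-- the body of A's while loop, as a single boolean condition at index i
def pvC (loc : List Int) (i : Int) : Bool :=
  (PySem.List.pyGetD (pvDiffA loc) (i - 1) 0 == 1 && PySem.List.pyGetD (pvDiffA loc) i 0 == 1 &&
      PySem.Int.mod (PySem.List.pyGetD loc i 0) 3 == 0) ||
  (PySem.List.pyGetD (pvDiffA loc) (i - 1) 0 == 2 && PySem.List.pyGetD (pvDiffA loc) i 0 == 2 &&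
      PySem.Int.mod (PySem.List.pyGetD loc 0 0) 2 == 0) ||
  (PySem.List.pyGetD (pvDiffA loc) (i - 1) 0 == 3 && PySem.List.pyGetD (pvDiffA loc) i 0 == 3) ||
  (PySem.List.pyGetD (pvDiffA loc) (i - 1) 0 == 4 && PySem.List.pyGetD (pvDiffA loc) i 0 == 4)

theorem if_chain_or (c1 c2 c3 c4 k : Bool) :
    (if c1 then true else if c2 then true else if c3 then true else if c4 then true else k)
      = (c1 || c2 || c3 || c4 || k) := by
  cases c1 <;> cases c2 <;> cases c3 <;> cases c4 <;> simp

theorem any_or_distrib (l : List Int) (f g : Int → Bool) :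
    l.any (fun x => f x || g x) = (l.any f || l.any g) := by
  induction l with
  | nil => rfl
  | cons a t ih =>
    simp only [List.any_cons, ih]
    cases f a <;> cases g a <;> simp

theorem any_and_const (l : List Int) (f : Int → Bool) (b : Bool) :
    l.any (fun x => f x && b) = (l.any f && b) := by
  cases b <;> simp

theorem not_isEmpty_eq_any_true (l : List Int) : (!l.isEmpty) = l.any (fun _ => true) := by
  cases l <;> simp

-- A's while loop is the 'any' of pvC over the remaining indices
theorem whileA_eq_any (location : List Int) :
    ∀ (fuel : Nat) (x : Int), (location.length : Int) - 1 ≤ x + fuel →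
      pvWhileA location (pvDiffA location) fuel x =
        (PySem.List.pyRange x ((location.length : Int) - 1) 1).any (pvC location) := by
  intro fuel
  induction fuel with
  | zero =>
    intro x h
    rw [PySem.List.pyRange_one_eq_nil (by omega)]
    rfl
  | succ fuel ih =>
    intro x h
    by_cases hx : x ≤ (location.length : Int) - 2
    · rw [PySem.List.pyRange_one_cons (by omega)]
      show (if x ≤ (location.length : Int) - 2 then _ else false) = _
      rw [if_pos hx]
      rw [if_chain_or, ih (x + 1) (by omega)]
      simp [pvC, Bool.or_assoc]
    · show (if x ≤ (location.length : Int) - 2 then _ else false) = _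
      rw [if_neg hx, PySem.List.pyRange_one_eq_nil (by omega)]
      rfl

theorem diffA_get (location : List Int) (i : Nat) (h : i + 1 < location.length) :
    PySem.List.pyGetD (pvDiffA location) (i : Int) 0 =
      location.getD (i + 1) 0 - location.getD i 0 := by
  unfold pvDiffA
  rw [PySem.List.foldl_append_singleton_eq_map
    (fun x => PySem.List.pyGetD location (x + 1) 0 - PySem.List.pyGetD location x 0)
    (PySem.List.pyRange 0 ((location.length : Int) - 1) 1) []]
  have hlen : ((location.length : Int) - 1) = ((location.length - 1 : Nat) : Int) := by
    have : 1 ≤ location.length := by omega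
    push_cast [this]; ring
  rw [List.nil_append, hlen]
  rw [PySem.List.pyGetD_map_pyRange _ _ i _ (by omega)]
  have hc : ((i : Int) + 1) = ((i + 1 : Nat) : Int) := by push_cast; ring
  rw [hc, PySem.List.pyGetD_natCast, PySem.List.pyGetD_natCast]

-- on the index range both sides scan, pvC coincides with the differences taken on the fly
theorem pvC_pointwise (location : List Int) (i : Int)
    (hmem : i ∈ PySem.List.pyRange 1 ((location.length : Int) - 1) 1) :
    pvC location i =
      ((PySem.List.pyGetD location i 0 - PySem.List.pyGetD location (i - 1) 0 == 1 &&
          (PySem.List.pyGetD location (i + 1) 0 - PySem.List.pyGetD location i 0 == 1 &&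
          PySem.Int.mod (PySem.List.pyGetD location i 0) 3 == 0)) ||
      ((PySem.List.pyGetD location i 0 - PySem.List.pyGetD location (i - 1) 0 == 2 &&
          (PySem.List.pyGetD location (i + 1) 0 - PySem.List.pyGetD location i 0 == 2 &&
          PySem.Int.mod (PySem.List.pyGetD location 0 0) 2 == 0)) ||
      ((PySem.List.pyGetD location i 0 - PySem.List.pyGetD location (i - 1) 0 == 3 &&
          PySem.List.pyGetD location (i + 1) 0 - PySem.List.pyGetD location i 0 == 3) ||
      (PySem.List.pyGetD location i 0 - PySem.List.pyGetD location (i - 1) 0 == 4 &&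
          PySem.List.pyGetD location (i + 1) 0 - PySem.List.pyGetD location i 0 == 4)))) := by
  rw [PySem.List.mem_pyRange_one] at hmem
  obtain ⟨h1, h2⟩ := hmem
  set k := i.toNat with hk
  have hik : i = (k : Int) := by omega
  have hc : i - 1 = ((k - 1 : Nat) : Int) := by omega
  have hgd1 : PySem.List.pyGetD (pvDiffA location) (i - 1) 0 =
      PySem.List.pyGetD location i 0 - PySem.List.pyGetD location (i - 1) 0 := by
    rw [hc, hik, diffA_get location (k - 1) (by omega)]
    rw [show (k - 1) + 1 = k from by omega]
    rw [PySem.List.pyGetD_natCast, PySem.List.pyGetD_natCast]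
  have hgd2 : PySem.List.pyGetD (pvDiffA location) i 0 =
      PySem.List.pyGetD location (i + 1) 0 - PySem.List.pyGetD location i 0 := by
    rw [hik, diffA_get location k (by omega)]
    rw [show ((k : Int) + 1) = ((k + 1 : Nat) : Int) from by omega]
    rw [PySem.List.pyGetD_natCast, PySem.List.pyGetD_natCast]
  unfold pvC
  rw [hgd1, hgd2]
  simp only [Bool.and_assoc, Bool.or_assoc]

theorem or_eq_if_chain (c1 c2 c3 c4 : Bool) :
    (c1 || (c2 || (c3 || c4))) = (if c1 then true else if c2 then true else (c3 || c4)) := by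
  cases c1 <;> cases c2 <;> simp

theorem ports_agree (location : List Int) :
    completed_algorithm location = completed_algorithm_alt location := by
  have hA : completed_algorithm location =
      (PySem.List.pyRange 1 ((location.length : Int) - 1) 1).any (pvC location) := by
    unfold completed_algorithm
    by_cases h3 : ((location.length : Int)) ≥ 3
    · rw [if_pos h3, whileA_eq_any location location.length 1 (by omega)]
    · rw [if_neg h3, PySem.List.pyRange_one_eq_nil (by omega)]
      rfl
  have hcongr :
      (PySem.List.pyRange 1 ((location.length : Int) - 1) 1).any (pvC location) =
      (PySem.List.pyRange 1 ((location.length : Int) - 1) 1).any (fun i =>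
        (PySem.List.pyGetD location i 0 - PySem.List.pyGetD location (i - 1) 0 == 1 &&
            (PySem.List.pyGetD location (i + 1) 0 - PySem.List.pyGetD location i 0 == 1 &&
            PySem.Int.mod (PySem.List.pyGetD location i 0) 3 == 0)) ||
        ((PySem.List.pyGetD location i 0 - PySem.List.pyGetD location (i - 1) 0 == 2 &&
            (PySem.List.pyGetD location (i + 1) 0 - PySem.List.pyGetD location i 0 == 2 &&
            PySem.Int.mod (PySem.List.pyGetD location 0 0) 2 == 0)) ||
        ((PySem.List.pyGetD location i 0 - PySem.List.pyGetD location (i - 1) 0 == 3 &&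
            PySem.List.pyGetD location (i + 1) 0 - PySem.List.pyGetD location i 0 == 3) ||
        (PySem.List.pyGetD location i 0 - PySem.List.pyGetD location (i - 1) 0 == 4 &&
            PySem.List.pyGetD location (i + 1) 0 - PySem.List.pyGetD location i 0 == 4)))) :=
    PySem.List.any_congr_mem (fun i hi => pvC_pointwise location i hi)
  rw [hA, hcongr, any_or_distrib, any_or_distrib, any_or_distrib]
  unfold completed_algorithm_alt pvMids
  rw [not_isEmpty_eq_any_true, not_isEmpty_eq_any_true, not_isEmpty_eq_any_true]
  rw [List.any_filter, List.any_filter, List.any_filter, List.any_filter]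
  rw [← any_and_const]
  simp only [Bool.and_assoc, Bool.and_true]
  rw [or_eq_if_chain]

-- ===== VERDICT (by name: the statement is the Claim_ definition above) =====
theorem completed_algorithm_spec : Claim_equal_completed_algorithm := by
  intro location _
  unfold Spec_completed_algorithm
  exact ports_agree location
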